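-- pv_equiv track=rewrite | github.com/Kaixin-Wu/PythonTest | utils.py | input_format
-- ===== SOURCE A (Python) =====
-- def input_format(sents, pad_token):
--
--     max_len = max(len(s) for s in sents)
--     batch_size = len(sents)
--
--     sents_t = []
--     pos = []
--     for i in range(batch_size):
--         sents_t.append([sents[i][k] if len(sents[i]) > k else pad_token for k in range(max_len)])
--         pos.append([ k+1 if len(sents[i]) > k else pad_token for k in range(max_len)])
--
--     return sents_t, pos
-- ===== SOURCE B (Python) =====
-- def input_format(sents, pad_token):
--     # Column-major construction: build the matrices one time-step (column) at a
--     # time, then transpose back to batch-major rows.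
--     max_len = max(len(s) for s in sents)
--     cols_t = []
--     cols_p = []
--     for k in range(max_len):
--         ct = []
--         cp = []
--         for s in sents:
--             if k < len(s):
--                 ct.append(s[k])
--                 cp.append(k + 1)
--             else:
--                 ct.append(pad_token)
--                 cp.append(pad_token)
--         cols_t.append(ct)
--         cols_p.append(cp)
--     sents_t = [[c[i] for c in cols_t] for i in range(len(sents))]
--     pos = [[c[i] for c in cols_p] for i in range(len(sents))]
--     return sents_t, pos
-- ===== Notes on version B (the rewrite author's own statement) =====
-- stated objective: alternative
-- what changed: B builds the padded matrices column-by-column (one time-step at a time, iterating the batch in the inner loop) and then transposes back to batch-major rows, instead of A's row-by-row construction over range(max_len).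
import Mathlib
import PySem

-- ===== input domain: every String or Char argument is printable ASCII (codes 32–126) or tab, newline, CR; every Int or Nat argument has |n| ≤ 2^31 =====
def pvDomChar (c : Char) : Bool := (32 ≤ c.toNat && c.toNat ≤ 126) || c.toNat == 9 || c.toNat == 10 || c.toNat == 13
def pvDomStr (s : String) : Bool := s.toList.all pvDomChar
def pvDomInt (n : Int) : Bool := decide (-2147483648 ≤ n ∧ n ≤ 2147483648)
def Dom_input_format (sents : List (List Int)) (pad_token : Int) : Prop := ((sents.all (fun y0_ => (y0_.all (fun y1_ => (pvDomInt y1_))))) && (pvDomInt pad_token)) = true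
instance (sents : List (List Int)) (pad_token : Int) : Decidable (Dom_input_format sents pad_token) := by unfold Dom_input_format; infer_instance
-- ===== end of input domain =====

-- B builds the matrices column-by-column (batch in the inner loop) and transposes back
-- to rows, instead of A's row-by-row construction; same cost, a different traversal order.

-- ===== PORT A =====
def input_format (sents : List (List Int)) (pad_token : Int) : List (List Int) × List (List Int) :=
  -- max(len(s) for s in sents); Pre_ excludes sents = [], where Python raises ValueError
  let max_len : Int := ((PySem.List.max? (sents.map (fun s => (s.length : Int))) id).getD 0)
  let batch_size : Int := (sents.length : Int)
  (PySem.List.pyRange 0 batch_size 1).foldl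
    (fun (acc : List (List Int) × List (List Int)) i =>
      (acc.1 ++ [(PySem.List.pyRange 0 max_len 1).map
          (fun k => if ((PySem.List.pyGetD sents i []).length : Int) > k
                    then PySem.List.pyGetD (PySem.List.pyGetD sents i []) k 0 else pad_token)],
       acc.2 ++ [(PySem.List.pyRange 0 max_len 1).map
          (fun k => if ((PySem.List.pyGetD sents i []).length : Int) > k
                    then k + 1 else pad_token)]))
    ([], [])

-- ===== PORT B =====
def input_format_alt (sents : List (List Int)) (pad_token : Int) : List (List Int) × List (List Int) :=
  let max_len : Int := ((PySem.List.max? (sents.map (fun s => (s.length : Int))) id).getD 0)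
  -- for k in range(max_len): build one token column and one position column over the batch
  let cols := (PySem.List.pyRange 0 max_len 1).foldl
    (fun (acc : List (List Int) × List (List Int)) k =>
      let col := sents.foldl
        (fun (c : List Int × List Int) s =>
          if k < (s.length : Int)
          then (c.1 ++ [PySem.List.pyGetD s k 0], c.2 ++ [k + 1])
          else (c.1 ++ [pad_token], c.2 ++ [pad_token]))
        ([], [])
      (acc.1 ++ [col.1], acc.2 ++ [col.2]))
    ([], [])
  -- transpose: row i is element i of every column
  ((PySem.List.pyRange 0 (sents.length : Int) 1).map
      (fun i => cols.1.map (fun c => PySem.List.pyGetD c i 0)),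
   (PySem.List.pyRange 0 (sents.length : Int) 1).map
      (fun i => cols.2.map (fun c => PySem.List.pyGetD c i 0)))

-- ===== PRECONDITION & SPEC =====
-- Pre_ excludes only the empty batch, on which Python's max() raises ValueError in both A and B.
def Pre_input_format (sents : List (List Int)) (_pad_token : Int) : Prop := sents ≠ []
instance (sents : List (List Int)) (pad_token : Int) : Decidable (Pre_input_format sents pad_token) := by unfold Pre_input_format; infer_instance
def pvWitness_input_format : List (List Int) × Int := ([[1, 2], [3]], 0)

def Spec_input_format (sents : List (List Int)) (pad_token : Int) (out : List (List Int) × List (List Int)) : Prop := out = input_format_alt sents pad_token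
instance (sents : List (List Int)) (pad_token : Int) (out : List (List Int) × List (List Int)) : Decidable (Spec_input_format sents pad_token out) := by unfold Spec_input_format; infer_instance

-- ===== CLAIM (what is proved, stated in full; the proofs are below) =====
def Claim_equal_input_format : Prop := ∀ (sents : List (List Int)) (pad_token : Int), Dom_input_format sents pad_token → Pre_input_format sents pad_token → Spec_input_format sents pad_token (input_format sents pad_token)

-- ===== LEMMAS AND PROOFS =====

-- the common normal form both ports are reduced to: the conditional token/position rows
def pvRowTok (m : Nat) (pad : Int) (s : List Int) : List Int :=
  (List.range m).map (fun k : Nat => if (k : Int) < (s.length : Int) then s.getD k 0 else pad)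
def pvRowPos (m : Nat) (pad : Int) (s : List Int) : List Int :=
  (List.range m).map (fun k : Nat => if (k : Int) < (s.length : Int) then (k : Int) + 1 else pad)

-- indexing a list by every position in range(len) is just mapping over it
lemma map_range_getD {α β : Type} (xs : List α) (d : α) (f : α → β) :
    (List.range xs.length).map (fun i => f (xs.getD i d)) = xs.map f := by
  apply List.ext_getElem
  · simp
  · intro i hi₁ hi₂
    simp only [List.getElem_map, List.getElem_range]
    congr 1
    simp [List.getD, List.getElem?_eq_getElem (by simpa using hi₂)]

-- getD through map at an in-range index
lemma getD_map_of_lt {α β : Type} (xs : List α) (f : α → β) (d : α) (e : β) {i : Nat}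
    (hi : i < xs.length) : (xs.map f).getD i e = f (xs.getD i d) := by
  simp [List.getD, List.getElem?_map, List.getElem?_eq_getElem hi]

-- Python's max() over a nonempty list returns a value
lemma max?_ne_none {α κ : Type} [LinearOrder κ] (a : α) (l : List α) (key : α → κ) :
    PySem.List.max? (a :: l) key ≠ none := by
  unfold PySem.List.max?
  induction l generalizing a with
  | nil => simp
  | cons b t ih => simp only [List.foldl_cons]; split <;> apply ih

-- A reduces to the normal form
lemma portA_eq (sents : List (List Int)) (pad : Int) {M : Int}
    (hM : PySem.List.max? (sents.map (fun s => (s.length : Int))) id = some M) (hM0 : 0 ≤ M) :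
    input_format sents pad = (sents.map (pvRowTok M.toNat pad), sents.map (pvRowPos M.toNat pad)) := by
  unfold input_format
  simp only [hM, Option.getD_some]
  rw [PySem.List.foldl_prod_mk
        (f := fun (a : List (List Int)) (i : Int) => a ++ [(PySem.List.pyRange 0 M 1).map
          (fun k => if ((PySem.List.pyGetD sents i []).length : Int) > k
                    then PySem.List.pyGetD (PySem.List.pyGetD sents i []) k 0 else pad)])
        (g := fun (a : List (List Int)) (i : Int) => a ++ [(PySem.List.pyRange 0 M 1).map
          (fun k => if ((PySem.List.pyGetD sents i []).length : Int) > k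
                    then k + 1 else pad)])]
  rw [PySem.List.foldl_append_singleton_eq_map, PySem.List.foldl_append_singleton_eq_map]
  have hMc : M = ((M.toNat : Nat) : Int) := by omega
  rw [hMc, PySem.List.pyRange_zero_natCast, PySem.List.pyRange_zero_natCast]
  simp only [List.nil_append, List.map_map, Function.comp_def, PySem.List.pyGetD_natCast,
    Int.toNat_natCast]
  unfold pvRowTok pvRowPos
  refine Prod.ext ?_ ?_ <;> dsimp only <;>
    rw [← map_range_getD sents ([] : List Int)]

-- B's inner loop over the batch builds the two columns for time-step k
lemma col_eq (sents : List (List Int)) (pad k : Int) :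
    sents.foldl
      (fun (c : List Int × List Int) s =>
        if k < (s.length : Int)
        then (c.1 ++ [PySem.List.pyGetD s k 0], c.2 ++ [k + 1])
        else (c.1 ++ [pad], c.2 ++ [pad]))
      ([], [])
    = (sents.map (fun s => if k < (s.length : Int) then PySem.List.pyGetD s k 0 else pad),
       sents.map (fun s => if k < (s.length : Int) then k + 1 else pad)) := by
  have hstep : (fun (c : List Int × List Int) s =>
      if k < (s.length : Int)
      then (c.1 ++ [PySem.List.pyGetD s k 0], c.2 ++ [k + 1])
      else (c.1 ++ [pad], c.2 ++ [pad]))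
    = (fun (c : List Int × List Int) (s : List Int) =>
      (c.1 ++ [if k < (s.length : Int) then PySem.List.pyGetD s k 0 else pad],
       c.2 ++ [if k < (s.length : Int) then k + 1 else pad])) := by
    funext c s
    by_cases h : k < (s.length : Int) <;> simp [h]
  rw [hstep, PySem.List.foldl_prod_mk
        (f := fun (c : List Int) (s : List Int) => c ++ [if k < (s.length : Int) then PySem.List.pyGetD s k 0 else pad])
        (g := fun (c : List Int) (s : List Int) => c ++ [if k < (s.length : Int) then k + 1 else pad])]
  rw [PySem.List.foldl_append_singleton_eq_map, PySem.List.foldl_append_singleton_eq_map]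
  simp

-- B reduces to the same normal form
lemma portB_eq (sents : List (List Int)) (pad : Int) {M : Int}
    (hM : PySem.List.max? (sents.map (fun s => (s.length : Int))) id = some M) (hM0 : 0 ≤ M) :
    input_format_alt sents pad = (sents.map (pvRowTok M.toNat pad), sents.map (pvRowPos M.toNat pad)) := by
  unfold input_format_alt
  simp only [hM, Option.getD_some, col_eq]
  rw [PySem.List.foldl_prod_mk
        (f := fun (a : List (List Int)) (k : Int) =>
          a ++ [sents.map (fun s => if k < (s.length : Int) then PySem.List.pyGetD s k 0 else pad)])
        (g := fun (a : List (List Int)) (k : Int) =>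
          a ++ [sents.map (fun s => if k < (s.length : Int) then k + 1 else pad)])]
  rw [PySem.List.foldl_append_singleton_eq_map, PySem.List.foldl_append_singleton_eq_map]
  have hMc : M = ((M.toNat : Nat) : Int) := by omega
  rw [hMc, PySem.List.pyRange_zero_natCast, PySem.List.pyRange_zero_natCast]
  simp only [List.nil_append, List.map_map, Function.comp_def, PySem.List.pyGetD_natCast,
    Int.toNat_natCast]
  unfold pvRowTok pvRowPos
  refine Prod.ext ?_ ?_ <;> dsimp only <;>
    (rw [← map_range_getD sents ([] : List Int)]
     apply List.map_congr_left
     intro i hi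
     have hi' : i < sents.length := by simpa using hi
     apply List.ext_getElem
     · simp
     · intro j hj₁ hj₂
       simp only [List.getElem_map, List.getElem_range]
       rw [getD_map_of_lt (d := ([] : List Int)) _ _ _ hi'])

-- ===== VERDICT (by name: the statement is the Claim_ definition above) =====
theorem input_format_spec : Claim_equal_input_format := by
  intro sents pad _ hpre
  unfold Spec_input_format
  obtain ⟨M, hM⟩ : ∃ M, PySem.List.max? (sents.map (fun s => (s.length : Int))) id = some M := by
    cases hmx : PySem.List.max? (sents.map (fun s => (s.length : Int))) id with
    | none =>
        exfalso
        cases sents with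
        | nil => exact hpre rfl
        | cons a l =>
            rw [List.map_cons] at hmx
            exact max?_ne_none _ _ _ hmx
    | some m => exact ⟨m, rfl⟩
  have hMmem : M ∈ sents.map (fun s => (s.length : Int)) := PySem.List.max?_mem hM
  obtain ⟨s₀, _, hs₀⟩ := List.mem_map.mp hMmem
  have hM0 : 0 ≤ M := by omega
  rw [portA_eq sents pad hM hM0, portB_eq sents pad hM hM0]
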